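-- pv_equiv track=rewrite | github.com/oppry/leetcode | 000205.py | code_s_error
-- ===== SOURCE A (Python) =====
-- def code_s_error(s):
--     d = {}
--     ret = 0
--     sign = 0
--     for i in s:
--         if i not in d:
--             d[i] = sign
--             sign += 1
--         ret = ret + d[i]
--     return ret
-- ===== SOURCE B (Python) =====
-- def code_s_error(s):
--     counts = {}
--     for ch in s:
--         counts[ch] = counts.get(ch, 0) + 1
--     total = 0
--     for rank, cnt in enumerate(counts.values()):
--         total += rank * cnt
--     return total
-- ===== Notes on version B (the rewrite author's own statement) =====
-- stated objective: alternative
-- what changed: Replaced the single accumulate-as-you-go pass (dict of ranks plus running sum plus next-rank counter) by a count-first decomposition: build an insertion-ordered frequency table, then sum rank*count over its enumerated entries.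
import Mathlib
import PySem

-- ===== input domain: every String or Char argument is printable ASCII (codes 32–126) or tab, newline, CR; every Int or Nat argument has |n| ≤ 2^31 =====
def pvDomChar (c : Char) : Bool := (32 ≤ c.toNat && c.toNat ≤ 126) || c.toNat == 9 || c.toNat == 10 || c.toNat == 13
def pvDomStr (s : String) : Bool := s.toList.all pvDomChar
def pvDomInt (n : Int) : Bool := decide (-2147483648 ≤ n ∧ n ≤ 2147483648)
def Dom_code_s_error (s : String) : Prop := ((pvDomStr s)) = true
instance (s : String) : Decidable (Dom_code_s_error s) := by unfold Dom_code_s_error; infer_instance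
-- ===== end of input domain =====

-- B replaces A's single accumulate-as-you-go pass by a count-first pass plus a
-- rank-weighted sum over the enumerated frequency table (objective: alternative decomposition, same cost).

-- ===== PORT A =====
-- one loop iteration of A: state is (d, ret, sign)
def pvStepA (st : PySem.Dict Char Int × Int × Int) (i : Char) : PySem.Dict Char Int × Int × Int :=
  let d := st.1; let ret := st.2.1; let sign := st.2.2
  let ds : PySem.Dict Char Int × Int := if d.contains i then (d, sign) else (d.insert i sign, sign + 1)
  (ds.1, ret + ds.1.getD i 0, ds.2)

def code_s_error (s : String) : Int :=
  (s.toList.foldl pvStepA (PySem.Dict.empty, 0, 0)).2.1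

-- ===== PORT B =====
def code_s_error_alt (s : String) : Int :=
  let counts := s.toList.foldl (fun d ch => d.insert ch (d.getD ch 0 + 1)) PySem.Dict.empty
  (PySem.List.enumerate counts.values 0).foldl (fun total p => total + p.1 * p.2) 0

-- ===== PRECONDITION & SPEC =====
def Spec_code_s_error (s : String) (out : Int) : Prop := out = code_s_error_alt s
instance (s : String) (out : Int) : Decidable (Spec_code_s_error s out) := by unfold Spec_code_s_error; infer_instance

-- ===== CLAIM (what is proved, stated in full; the proofs are below) =====
def Claim_equal_code_s_error : Prop := ∀ (s : String), Dom_code_s_error s → Spec_code_s_error s (code_s_error s)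

-- ===== LEMMAS AND PROOFS =====

-- rank-weighted sum with starting rank n: Σ (n+idx) * f k over K
def pvEsum (K : List Char) (f : Char → Int) (n : Int) : Int :=
  ((PySem.List.enumerate K n).map (fun p => p.1 * f p.2)).sum

theorem pvEsum_nil (f : Char → Int) (n : Int) : pvEsum [] f n = 0 := rfl

theorem pvEsum_cons (a : Char) (K : List Char) (f : Char → Int) (n : Int) :
    pvEsum (a :: K) f n = n * f a + pvEsum K f (n + 1) := by
  simp [pvEsum, PySem.List.enumerate_cons]

theorem pvEsum_congr (K : List Char) (f g : Char → Int) (n : Int)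
    (h : ∀ k ∈ K, f k = g k) : pvEsum K f n = pvEsum K g n := by
  induction K generalizing n with
  | nil => rfl
  | cons a K ih =>
    rw [pvEsum_cons, pvEsum_cons, h a (List.mem_cons_self),
      ih (n + 1) (fun k hk => h k (List.mem_cons_of_mem a hk))]

theorem pvEsum_append_singleton (K : List Char) (c : Char) (f : Char → Int) (n : Int) :
    pvEsum (K ++ [c]) f n = pvEsum K f n + (n + K.length) * f c := by
  induction K generalizing n with
  | nil => simp [pvEsum_cons, pvEsum_nil]
  | cons a K ih =>
    rw [List.cons_append, pvEsum_cons, pvEsum_cons, ih (n + 1)]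
    simp only [List.length_cons]
    push_cast
    ring

theorem pvEsum_bump (K : List Char) (c : Char) (f : Char → Int) (n : Int)
    (hnd : K.Nodup) (hc : c ∈ K) :
    pvEsum K (fun k => f k + if k = c then 1 else 0) n = pvEsum K f n + (n + K.idxOf c) := by
  induction K generalizing n with
  | nil => cases hc
  | cons a K ih =>
    rw [pvEsum_cons, pvEsum_cons]
    by_cases hac : a = c
    · subst hac
      have hnmem : a ∉ K := (List.nodup_cons.mp hnd).1
      rw [pvEsum_congr K (fun k => f k + if k = a then 1 else 0) f (n + 1)
            (by intro k hk; simp [show k ≠ a from fun h => hnmem (h ▸ hk)])]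
      simp only [List.idxOf_cons_self]
      push_cast
      ring
    · have hcK : c ∈ K := by
        rcases List.mem_cons.mp hc with h | h
        · exact absurd h.symm hac
        · exact h
      rw [ih (n + 1) (List.nodup_cons.mp hnd).2 hcK,
        List.idxOf_cons_ne _ (by exact hac), if_neg hac]
      push_cast
      ring

theorem pv_idxOf_append_not_mem (K : List Char) (c : Char) (h : c ∉ K) :
    (K ++ [c]).idxOf c = K.length := by
  induction K with
  | nil => simp
  | cons a K ih =>
    have hac : a ≠ c := fun hh => h (by simp [hh])
    rw [List.cons_append, List.idxOf_cons_ne _ hac, ih (fun hh => h (by simp [hh]))]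
    rfl

theorem pv_enumerate_map (K : List Char) (g : Char → Int) (n : Int) :
    PySem.List.enumerate (K.map g) n = (PySem.List.enumerate K n).map (fun p => (p.1, g p.2)) := by
  induction K generalizing n with
  | nil => rfl
  | cons a K ih => simp [PySem.List.enumerate_cons, ih]

-- B's value, as a rank-weighted sum over the deduped characters
theorem pv_alt_eq_esum (s : String) :
    code_s_error_alt s
      = pvEsum (PySem.Set.ofList s.toList) (fun k => (s.toList.count k : Int)) 0 := by
  have h0 : code_s_error_alt s
      = (PySem.List.enumerate (PySem.Dict.counter s.toList).values 0).foldl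
          (fun total p => total + p.1 * p.2) 0 := rfl
  have hv : (PySem.Dict.counter s.toList).values
      = (PySem.Set.ofList s.toList).map (fun k => (s.toList.count k : Int)) := by
    show ((PySem.Dict.counter s.toList).items).map (·.2) = _
    rw [PySem.Dict.items_counter]
    simp
  rw [h0, hv, pv_enumerate_map, PySem.List.foldl_add]
  simp [pvEsum, List.map_map, Function.comp_def]

-- the loop invariant of A, over the final-segment structure of the string
theorem pvA_inv (l : List Char) :
    (l.foldl pvStepA (PySem.Dict.empty, 0, 0)).1.keys = PySem.Set.ofList l ∧
    (l.foldl pvStepA (PySem.Dict.empty, 0, 0)).2.2 = ((PySem.Set.ofList l).length : Int) ∧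
    (∀ c ∈ PySem.Set.ofList l,
      (l.foldl pvStepA (PySem.Dict.empty, 0, 0)).1.getD c 0 = ((PySem.Set.ofList l).idxOf c : Int)) ∧
    (l.foldl pvStepA (PySem.Dict.empty, 0, 0)).2.1
      = pvEsum (PySem.Set.ofList l) (fun k => (l.count k : Int)) 0 := by
  induction l using List.reverseRecOn with
  | nil =>
    refine ⟨rfl, rfl, ?_, rfl⟩
    intro c hc; cases hc
  | append_singleton l c ih =>
    obtain ⟨hkeys, hsign, hget, hret⟩ := ih
    rw [List.foldl_append]
    set st := l.foldl pvStepA (PySem.Dict.empty, 0, 0) with hst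
    have hstep : List.foldl pvStepA st [c] = pvStepA st c := rfl
    rw [hstep]
    have hcount : ∀ k, ((l ++ [c]).count k : Int)
        = (l.count k : Int) + if k = c then 1 else 0 := by
      intro k
      by_cases h : k = c
      · subst h; simp [List.count_append]
      · have h2 : c ≠ k := Ne.symm h
        simp [List.count_append, h, h2]
    by_cases hmem : c ∈ l
    · -- seen character: dict and sign unchanged; ret gains the rank of c
      have hcS : c ∈ PySem.Set.ofList l := (PySem.Set.mem_ofList _ _).mpr hmem
      have hcont : st.1.contains c = true :=
        (PySem.Dict.contains_iff_mem_keys _ _).mpr (hkeys ▸ hcS)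
      have hS : PySem.Set.ofList (l ++ [c]) = PySem.Set.ofList l := by
        rw [PySem.Set.ofList_append_singleton, PySem.Set.add_of_mem hcS]
      have hA : pvStepA st c = (st.1, st.2.1 + st.1.getD c 0, st.2.2) := by
        simp [pvStepA, hcont]
      rw [hA, hS]
      refine ⟨hkeys, hsign, hget, ?_⟩
      show st.2.1 + st.1.getD c 0 = _
      rw [hret, hget c hcS,
        pvEsum_congr _ _ (fun k => (l.count k : Int) + if k = c then 1 else 0) 0
          (fun k _ => hcount k),
        pvEsum_bump _ _ _ _ (PySem.Set.nodup_ofList l) hcS]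
      ring
    · -- new character: appended to the dict with rank = current size
      have hcS : c ∉ PySem.Set.ofList l := fun h => hmem ((PySem.Set.mem_ofList _ _).mp h)
      have hcont : st.1.contains c = false := by
        rw [← Bool.not_eq_true]
        intro h
        exact hcS (hkeys ▸ (PySem.Dict.contains_iff_mem_keys _ _).mp h)
      have hS : PySem.Set.ofList (l ++ [c]) = PySem.Set.ofList l ++ [c] := by
        rw [PySem.Set.ofList_append_singleton, PySem.Set.add_of_not_mem hcS]
      have hA : pvStepA st c
          = (st.1.insert c st.2.2, st.2.1 + (st.1.insert c st.2.2).getD c 0, st.2.2 + 1) := by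
        simp [pvStepA, hcont]
      have hgc : (st.1.insert c st.2.2).getD c 0 = st.2.2 := by
        rw [PySem.Dict.getD_insert, if_pos rfl]
      rw [hA, hS]
      refine ⟨?_, ?_, ?_, ?_⟩
      · show (st.1.insert c st.2.2).keys = _
        rw [PySem.Dict.keys_insert_of_not_contains _ _ hcont, hkeys]
      · show st.2.2 + 1 = _
        rw [hsign]
        simp
      · intro c' hc'
        show (st.1.insert c st.2.2).getD c' 0 = _
        rw [PySem.Dict.getD_insert]
        rcases List.mem_append.mp hc' with h | h
        · have hne : c' ≠ c := fun hh => hcS (hh ▸ h)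
          rw [if_neg hne, hget c' h, List.idxOf_append_of_mem h]
        · have hcc : c' = c := by simpa using h
          subst hcc
          rw [if_pos rfl, hsign, pv_idxOf_append_not_mem _ _ hcS]
      · show st.2.1 + (st.1.insert c st.2.2).getD c 0 = _
        rw [hgc, hret, hsign, pvEsum_append_singleton]
        have hfc : ((l ++ [c]).count c : Int) = 1 := by
          rw [hcount c, if_pos rfl]
          simp [List.count_eq_zero_of_not_mem hmem]
        rw [hfc,
          pvEsum_congr _ (fun k => ((l ++ [c]).count k : Int)) (fun k => (l.count k : Int)) 0
            (by intro k hk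
                have hkl : k ∈ l := (PySem.Set.mem_ofList _ _).mp hk
                have hkc : k ≠ c := fun hh => hmem (hh ▸ hkl)
                show ((l ++ [c]).count k : Int) = (l.count k : Int)
                rw [hcount k, if_neg hkc]; ring)]
        ring

-- ===== VERDICT (by name: the statement is the Claim_ definition above) =====
theorem code_s_error_spec : Claim_equal_code_s_error := by
  intro s _
  show code_s_error s = code_s_error_alt s
  rw [pv_alt_eq_esum]
  exact (pvA_inv s.toList).2.2.2
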